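-- pv_equiv track=rewrite | github.com/narckot/ITEA_Python_base | hw_4_2.py | clear_word
-- ===== SOURCE A (Python) =====
-- from string import punctuation, ascii_letters, digits, whitespace
--
-- def clear_word(enter_string, our_filter):  # ф-ция проверяет текст на латинские символы
--     enter_char = []
--     enter_list = list(enter_string)
--     for i in range(0, len(enter_list)):
--         if enter_list[i] in our_filter:
--             continue
--         if enter_list[i] not in ascii_letters:
--             raise ValueError
--         enter_char.append(enter_list[i])
--
--     return enter_char
-- ===== SOURCE B (Python) =====
-- from string import ascii_letters
--
-- def clear_word(enter_string, our_filter):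
--     # set arithmetic: any character that survives the filter and is not a letter -> error
--     if set(enter_string) - set(our_filter) - set(ascii_letters):
--         raise ValueError
--     # delete the filter characters with a translation table
--     return list(enter_string.translate(str.maketrans('', '', our_filter)))
-- ===== Notes on version B (the rewrite author's own statement) =====
-- stated objective: alternative
-- what changed: Replaced the fused per-character filter/validate/append loop with whole-string set arithmetic for validation (set(input) - set(filter) - set(ascii_letters) must be empty) and a translation-table deletion (str.translate with maketrans) to build the result, so no explicit per-character loop remains.
import Mathlib
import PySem

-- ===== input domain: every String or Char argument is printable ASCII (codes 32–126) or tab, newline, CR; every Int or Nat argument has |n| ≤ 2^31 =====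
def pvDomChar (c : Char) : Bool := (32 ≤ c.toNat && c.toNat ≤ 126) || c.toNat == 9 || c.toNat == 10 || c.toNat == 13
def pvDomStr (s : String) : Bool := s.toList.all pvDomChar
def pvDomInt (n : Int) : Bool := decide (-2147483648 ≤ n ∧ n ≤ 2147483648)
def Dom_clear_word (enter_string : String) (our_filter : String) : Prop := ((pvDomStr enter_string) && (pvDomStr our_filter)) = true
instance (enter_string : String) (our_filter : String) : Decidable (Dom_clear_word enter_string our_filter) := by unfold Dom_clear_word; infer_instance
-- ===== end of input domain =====

-- B replaces A's fused per-character filter/validate/append loop with set arithmetic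
-- for validation and a translation-table deletion for the result; objective: alternative.
-- Python's raise ValueError is modeled as `none` in A's loop; Pre_ excludes those inputs.

-- ===== PORT A =====
-- the fused loop: skip filtered chars, raise (none) on a non-ASCII-letter, else append
def clearWordLoop (fl : List Char) : List Char → List String → Option (List String)
  | [], acc => some acc
  | c :: rest, acc =>
    if fl.contains c then clearWordLoop fl rest acc
    else if !c.isAlpha then none
    else clearWordLoop fl rest (acc ++ [String.ofList [c]])

-- on inputs where Python raises ValueError the loop yields none; Pre_ excludes them
def clear_word (enter_string : String) (our_filter : String) : List String :=
  (clearWordLoop our_filter.toList enter_string.toList []).getD []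

-- ===== PORT B =====
-- string.ascii_letters as a character list (lowercase then uppercase, Python's order)
def asciiLettersChars : List Char :=
  "abcdefghijklmnopqrstuvwxyzABCDEFGHIJKLMNOPQRSTUVWXYZ".toList

-- set(enter_string) - set(our_filter) - set(ascii_letters): the illegal survivors
def badSet (enter_string : String) (our_filter : String) : PySem.Set Char :=
  PySem.Set.diff (PySem.Set.diff (PySem.Set.ofList enter_string.toList) our_filter.toList)
    asciiLettersChars

-- s.translate(str.maketrans('', '', our_filter)) deletes exactly the chars of our_filter;
-- ported by hand as a character filter, which is exact for a deletion-only table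
def translateDelete (s : String) (fl : List Char) : List Char :=
  s.toList.filter (fun c => !fl.contains c)

def clear_word_alt (enter_string : String) (our_filter : String) : List String :=
  if badSet enter_string our_filter ≠ [] then []   -- Python raises ValueError here; excluded by Pre_
  else (translateDelete enter_string our_filter.toList).map (fun c => String.ofList [c])

-- ===== PRECONDITION & SPEC =====
-- Pre_: every character of enter_string that is not in our_filter is an ASCII letter
-- (exactly the inputs on which the Python A returns instead of raising ValueError)
def Pre_clear_word (enter_string : String) (our_filter : String) : Prop :=
  (enter_string.toList.all (fun c => our_filter.toList.contains c || c.isAlpha)) = true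
instance (enter_string : String) (our_filter : String) : Decidable (Pre_clear_word enter_string our_filter) := by unfold Pre_clear_word; infer_instance

def pvWitness_clear_word : String × String := ("ab,c", ", ")

def Spec_clear_word (enter_string : String) (our_filter : String) (out : List String) : Prop := out = clear_word_alt enter_string our_filter
instance (enter_string : String) (our_filter : String) (out : List String) : Decidable (Spec_clear_word enter_string our_filter out) := by unfold Spec_clear_word; infer_instance

-- ===== CLAIM (what is proved, stated in full; the proofs are below) =====
def Claim_equal_clear_word : Prop := ∀ (enter_string : String) (our_filter : String), Dom_clear_word enter_string our_filter → Pre_clear_word enter_string our_filter → Spec_clear_word enter_string our_filter (clear_word enter_string our_filter)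

-- ===== LEMMAS AND PROOFS =====

-- every ASCII letter occurs in asciiLettersChars (the direction the proof needs)
theorem isAlpha_mem (c : Char) (h : c.isAlpha = true) : c ∈ asciiLettersChars := by
  have hv : (65 ≤ c.toNat ∧ c.toNat ≤ 90) ∨ (97 ≤ c.toNat ∧ c.toNat ≤ 122) := by
    unfold Char.isAlpha Char.isUpper Char.isLower at h
    simp only [Bool.or_eq_true, Bool.and_eq_true, decide_eq_true_eq,
      UInt32.le_iff_toNat_le] at h
    rcases h with ⟨h1, h2⟩ | ⟨h1, h2⟩
    · exact Or.inl ⟨h1, h2⟩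
    · exact Or.inr ⟨h1, h2⟩
  have hc : c = Char.ofNat c.toNat := by
    simp [Char.ofNat_toNat]
  rw [hc]
  rcases hv with ⟨h1, h2⟩ | ⟨h1, h2⟩ <;> interval_cases h' : c.toNat <;> decide

-- invariant of A's loop: if every non-filtered char is a letter, the loop returns
-- the accumulator followed by the filtered chars rendered as strings
theorem clearWordLoop_eq (fl : List Char) (l : List Char) (acc : List String)
    (h : ∀ c ∈ l, fl.contains c ∨ c.isAlpha) :
    clearWordLoop fl l acc =
      some (acc ++ (l.filter (fun c => !fl.contains c)).map (fun c => String.ofList [c])) := by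
  induction l generalizing acc with
  | nil => simp [clearWordLoop]
  | cons c rest ih =>
    have hc := h c (List.mem_cons_self ..)
    have hrest : ∀ c ∈ rest, fl.contains c ∨ c.isAlpha :=
      fun d hd => h d (List.mem_cons_of_mem _ hd)
    by_cases hin : c ∈ fl
    · simp [clearWordLoop, hin, ih _ hrest]
    · have halpha : c.isAlpha := by
        rcases hc with h1 | h1
        · exact absurd (List.mem_of_elem_eq_true h1) hin
        · exact h1
      simp [clearWordLoop, hin, halpha, ih _ hrest]

-- under Pre_, B's bad set is empty
theorem badSet_nil (s f : String)
    (h : ∀ c ∈ s.toList, f.toList.contains c = true ∨ c.isAlpha = true) :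
    badSet s f = [] := by
  unfold badSet
  rw [List.eq_nil_iff_forall_not_mem]
  intro c hc
  rw [PySem.Set.mem_diff] at hc
  obtain ⟨hc1, hc2⟩ := hc
  rw [PySem.Set.mem_diff, PySem.Set.mem_ofList] at hc1
  obtain ⟨hmem, hnf⟩ := hc1
  rcases h c hmem with h1 | h1
  · exact hnf (List.mem_of_elem_eq_true h1)
  · exact hc2 (isAlpha_mem c h1)

-- ===== VERDICT (by name: the statement is the Claim_ definition above) =====
theorem clear_word_spec : Claim_equal_clear_word := by
  intro s f _hdom hpre
  have h : ∀ c ∈ s.toList, f.toList.contains c = true ∨ c.isAlpha = true := by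
    intro c hc
    have := List.all_eq_true.mp hpre c hc
    exact Bool.or_eq_true_iff.mp this
  unfold Spec_clear_word clear_word clear_word_alt translateDelete
  rw [clearWordLoop_eq f.toList s.toList [] (by simpa using h), badSet_nil s f h]
  simp
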